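-- pv_equiv track=rewrite | github.com/msotsky/CS_PYTHON_MTA_MISC | notes.py | dog_cat
-- ===== SOURCE A (Python) =====
-- def dog_cat(str):
--     if len(str) < 6:
--         return False
--     else:
--         countdog = [1 for x in str if x in 'dog']
--         countcat = [1 for x in str if x in 'cat']
--         if countdog == countcat:
--             return True
--         else:
--             return  False
-- ===== SOURCE B (Python) =====
-- def dog_cat(str):
--     if len(str) < 6:
--         return False
--     weight = {'d': 1, 'o': 1, 'g': 1, 'c': -1, 'a': -1, 't': -1}
--     balance = 0
--     for ch in str:
--         balance += weight.get(ch, 0)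
--     return balance == 0
-- ===== Notes on version B (the rewrite author's own statement) =====
-- stated objective: alternative
-- what changed: Replaces A's two filtered scans that build lists of 1s and compare them with a single pass keeping one signed balance accumulator (+1 for dog-letters, -1 for cat-letters via a weight table), returning whether the balance is zero.
import Mathlib
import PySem

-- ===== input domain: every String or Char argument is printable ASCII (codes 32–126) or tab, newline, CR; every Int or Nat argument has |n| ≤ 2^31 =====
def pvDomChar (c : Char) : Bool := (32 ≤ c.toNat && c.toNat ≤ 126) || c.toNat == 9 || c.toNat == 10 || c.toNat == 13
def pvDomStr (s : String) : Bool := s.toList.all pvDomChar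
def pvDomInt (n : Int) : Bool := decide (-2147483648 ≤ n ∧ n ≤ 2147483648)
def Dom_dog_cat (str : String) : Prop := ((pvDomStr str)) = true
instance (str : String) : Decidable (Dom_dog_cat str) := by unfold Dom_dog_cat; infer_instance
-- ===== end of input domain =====

-- ===== PORT A =====
-- B makes a single pass with one signed balance accumulator (weight table +1/-1) instead of A's two filtered scans; same cost class.
def dog_cat (str : String) : Bool :=
  if str.toList.length < 6 then false
  else
    let countdog := (str.toList.filter (fun x => decide (x ∈ ['d','o','g']))).map (fun _ => (1 : Int))
    let countcat := (str.toList.filter (fun x => decide (x ∈ ['c','a','t']))).map (fun _ => (1 : Int))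
    if countdog == countcat then true else false

-- ===== PORT B =====
def dog_cat_alt (str : String) : Bool :=
  if str.toList.length < 6 then false
  else
    let weight : PySem.Dict Char Int :=
      PySem.Dict.mk [('d', 1), ('o', 1), ('g', 1), ('c', -1), ('a', -1), ('t', -1)]
    let balance := str.toList.foldl (fun acc ch => acc + weight.getD ch 0) 0
    balance == 0

-- ===== PRECONDITION & SPEC =====
def Spec_dog_cat (str : String) (out : Bool) : Prop := out = dog_cat_alt str
instance (str : String) (out : Bool) : Decidable (Spec_dog_cat str out) := by unfold Spec_dog_cat; infer_instance

-- ===== CLAIM (what is proved, stated in full; the proofs are below) =====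
def Claim_equal_dog_cat : Prop := ∀ (str : String), Dom_dog_cat str → Spec_dog_cat str (dog_cat str)

-- ===== LEMMAS AND PROOFS =====

def pvWeightIf (ch : Char) : Int :=
  if ch ∈ ['d','o','g'] then 1 else if ch ∈ ['c','a','t'] then -1 else 0

lemma weight_getD (ch : Char) :
    (PySem.Dict.mk [('d', (1:Int)), ('o', 1), ('g', 1), ('c', -1), ('a', -1), ('t', -1)]).getD ch 0
      = pvWeightIf ch := by
  by_cases h : ch = 'd'
  · subst h; decide
  by_cases h2 : ch = 'o'
  · subst h2; decide
  by_cases h3 : ch = 'g'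
  · subst h3; decide
  by_cases h4 : ch = 'c'
  · subst h4; decide
  by_cases h5 : ch = 'a'
  · subst h5; decide
  by_cases h6 : ch = 't'
  · subst h6; decide
  simp [PySem.Dict.getD, PySem.Dict.get?, pvWeightIf, h, h2, h3, h4, h5, h6,
    beq_eq_false_iff_ne.mpr (Ne.symm h), beq_eq_false_iff_ne.mpr (Ne.symm h2),
    beq_eq_false_iff_ne.mpr (Ne.symm h3), beq_eq_false_iff_ne.mpr (Ne.symm h4),
    beq_eq_false_iff_ne.mpr (Ne.symm h5), beq_eq_false_iff_ne.mpr (Ne.symm h6)]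

lemma balance_eq (l : List Char) (acc : Int) :
    l.foldl (fun acc ch => acc + pvWeightIf ch) acc
      = acc + l.countP (fun x => decide (x ∈ ['d','o','g'])) - l.countP (fun x => decide (x ∈ ['c','a','t'])) := by
  induction l generalizing acc with
  | nil => simp
  | cons x xs ih =>
    rw [List.foldl_cons, ih]
    simp only [List.countP_cons]
    by_cases h1 : x ∈ ['d','o','g'] <;> by_cases h2 : x ∈ ['c','a','t']
    · exfalso
      simp only [List.mem_cons, List.not_mem_nil, or_false] at h1 h2
      rcases h1 with rfl | rfl | rfl <;> revert h2 <;> decide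
    all_goals simp_all [pvWeightIf] <;> omega

-- ===== VERDICT (by name: the statement is the Claim_ definition above) =====
theorem dog_cat_spec : Claim_equal_dog_cat := by
  intro str _
  unfold Spec_dog_cat dog_cat dog_cat_alt
  by_cases h : str.toList.length < 6
  · rw [if_pos h, if_pos h]
  · rw [if_neg h, if_neg h]
    have hfun : (fun (acc : Int) (ch : Char) =>
        acc + (PySem.Dict.mk [('d', (1:Int)), ('o', 1), ('g', 1), ('c', -1), ('a', -1), ('t', -1)]).getD ch 0)
        = (fun acc ch => acc + pvWeightIf ch) := by
      funext acc ch; rw [weight_getD]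
    simp only [hfun, balance_eq, List.map_const', ← List.countP_eq_length_filter]
    rw [Bool.eq_iff_iff]
    simp only [List.replicate_inj, beq_iff_eq, or_true, and_true]
    split_ifs with hc <;> simp_all <;> omega
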